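-- pv_equiv track=rewrite | github.com/trevorbaca/akasha | akasha/library.py | stage_markup
-- ===== SOURCE A (Python) =====
-- def stage_markup(section_number, stage_tokens):
--     stage_markup = []
--     start_measure = 1
--     for stage_number, measure_count in stage_tokens:
--         stage_markup_ = (
--             f"[{section_number}.{stage_number}]",
--             start_measure,
--             "#darkcyan",
--         )
--         stage_markup.append(stage_markup_)
--         start_measure += measure_count
--     return stage_markup
-- ===== SOURCE B (Python) =====
-- def prefix_starts(counts, start=1):
--     """Starting measure of each stage: running offsets as a standalone table."""
--     if not counts:
--         return []
--     return [start] + prefix_starts(counts[1:], start + counts[0])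
--
--
-- def stage_markup(section_number, stage_tokens):
--     tokens = list(stage_tokens)
--     starts = prefix_starts([count for _, count in tokens])
--     return [
--         (f"[{section_number}.{stage}]", start, "#darkcyan")
--         for (stage, _), start in zip(tokens, starts)
--     ]
-- ===== Notes on version B (the rewrite author's own statement) =====
-- stated objective: alternative
-- what changed: Replaced the single accumulator loop (append + running start_measure mutation) by a two-phase decomposition: a recursive prefix-start table over the measure counts, then a zip/map comprehension emitting the markup tuples.
import Mathlib
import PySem

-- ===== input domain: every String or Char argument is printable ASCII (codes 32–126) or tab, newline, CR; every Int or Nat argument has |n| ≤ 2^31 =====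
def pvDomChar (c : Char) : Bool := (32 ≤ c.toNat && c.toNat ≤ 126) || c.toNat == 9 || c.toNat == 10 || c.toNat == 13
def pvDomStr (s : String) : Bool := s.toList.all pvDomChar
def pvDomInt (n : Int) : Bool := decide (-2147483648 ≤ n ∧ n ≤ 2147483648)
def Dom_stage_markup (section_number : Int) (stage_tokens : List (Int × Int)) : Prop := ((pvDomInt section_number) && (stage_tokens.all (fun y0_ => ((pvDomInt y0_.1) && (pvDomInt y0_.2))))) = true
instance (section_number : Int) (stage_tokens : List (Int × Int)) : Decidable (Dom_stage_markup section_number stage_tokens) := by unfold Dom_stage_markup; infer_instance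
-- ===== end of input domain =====

-- B replaces A's single accumulator loop by a recursive prefix-start table plus a zip/map phase (alternative decomposition, same cost).


-- ===== PORT A =====
-- append-accumulator loop with a running start_measure, as in A
def stage_markup (section_number : Int) (stage_tokens : List (Int × Int)) : List (String × Int × String) :=
  (stage_tokens.foldl
    (fun (st : List (String × Int × String) × Int) t =>
      (st.1 ++ [("[" ++ PySem.Int.toStr section_number ++ "." ++ PySem.Int.toStr t.1 ++ "]",
                 st.2, "#darkcyan")],
       st.2 + t.2))
    ([], 1)).1

-- ===== PORT B =====
-- B: prefix-start table (recursive), then a zip/map phase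
def prefixStarts : List Int → Int → List Int
  | [], _ => []
  | c :: cs, start => start :: prefixStarts cs (start + c)

def stage_markup_alt (section_number : Int) (stage_tokens : List (Int × Int)) : List (String × Int × String) :=
  let starts := prefixStarts (stage_tokens.map Prod.snd) 1
  (stage_tokens.zip starts).map (fun p =>
    ("[" ++ PySem.Int.toStr section_number ++ "." ++ PySem.Int.toStr p.1.1 ++ "]",
     p.2, "#darkcyan"))

-- ===== PRECONDITION & SPEC =====
def Spec_stage_markup (section_number : Int) (stage_tokens : List (Int × Int)) (out : List (String × Int × String)) : Prop := out = stage_markup_alt section_number stage_tokens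
instance (section_number : Int) (stage_tokens : List (Int × Int)) (out : List (String × Int × String)) : Decidable (Spec_stage_markup section_number stage_tokens out) := by unfold Spec_stage_markup; infer_instance

-- ===== CLAIM (what is proved, stated in full; the proofs are below) =====
def Claim_equal_stage_markup : Prop := ∀ (section_number : Int) (stage_tokens : List (Int × Int)), Dom_stage_markup section_number stage_tokens → Spec_stage_markup section_number stage_tokens (stage_markup section_number stage_tokens)

-- ===== LEMMAS AND PROOFS =====

-- ===== VERDICT (by name: the statement is the Claim_ definition above) =====
lemma foldA (section_number : Int) :
    ∀ (toks : List (Int × Int)) (acc : List (String × Int × String)) (start : Int),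
      (toks.foldl
        (fun (st : List (String × Int × String) × Int) t =>
          (st.1 ++ [("[" ++ PySem.Int.toStr section_number ++ "." ++ PySem.Int.toStr t.1 ++ "]",
                     st.2, "#darkcyan")],
           st.2 + t.2))
        (acc, start)).1
      = acc ++ (toks.zip (prefixStarts (toks.map Prod.snd) start)).map (fun p =>
          ("[" ++ PySem.Int.toStr section_number ++ "." ++ PySem.Int.toStr p.1.1 ++ "]",
           p.2, "#darkcyan"))
  | [], acc, start => by simp [prefixStarts]
  | t :: ts, acc, start => by
      simp only [List.foldl_cons, List.map_cons, prefixStarts, List.zip_cons_cons]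
      rw [foldA section_number ts]
      simp

theorem stage_markup_spec : Claim_equal_stage_markup := by
  intro sn toks _
  unfold Spec_stage_markup stage_markup stage_markup_alt
  simpa using foldA sn toks [] 1
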